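-- pv_equiv track=rewrite | github.com/suraj548/Interview-prep-journal | LinkedList/basic-iq.py | max_word_count
-- ===== SOURCE A (Python) =====
-- def max_word_count(str_value: str):
--     str_list = str_value.split()
--     str_dict = {}
--     for i in set(str_list):
--         str_dict.setdefault(i, 0)
--     for j in str_list:
--         str_dict[j] = str_dict[j]+1
--     sorted_list = sorted(str_dict.values(), reverse=True)
--     if len(sorted_list) > 1:
--         return sorted_list[1]
--     else:
--         return sorted_list[0]
-- ===== SOURCE B (Python) =====
-- def max_word_count(str_value: str):
--     counts = {}
--     for w in str_value.split():
--         counts[w] = counts.get(w, 0) + 1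
--     vals = list(counts.values())
--     top = max(vals)
--     if len(vals) == 1:
--         return top
--     vals.remove(top)
--     return max(vals)
-- ===== Notes on version B (the rewrite author's own statement) =====
-- stated objective: alternative
-- what changed: B counts words with a single get-based counter pass and finds the second-highest count by max / remove-one-occurrence / max, instead of A's setdefault pre-pass plus a full descending sort indexed at [1].
import Mathlib
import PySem

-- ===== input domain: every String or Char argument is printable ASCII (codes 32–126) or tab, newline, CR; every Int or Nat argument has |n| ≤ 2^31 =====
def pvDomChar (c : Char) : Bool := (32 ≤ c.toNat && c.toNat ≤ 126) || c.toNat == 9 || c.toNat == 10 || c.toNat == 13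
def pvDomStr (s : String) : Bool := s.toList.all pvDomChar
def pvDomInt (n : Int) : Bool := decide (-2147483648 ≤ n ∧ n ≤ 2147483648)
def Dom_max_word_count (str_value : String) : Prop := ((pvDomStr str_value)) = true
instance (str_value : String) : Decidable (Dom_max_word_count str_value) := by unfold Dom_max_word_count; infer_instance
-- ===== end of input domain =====

-- B replaces A's full descending sort of the counts by max / remove-one / max (no sort); objective: alternative/simpler.

-- ===== PORT A =====
-- str_dict[j] = str_dict[j]+1 is ported as modify with default 0: the setdefault loop
-- guarantees every j of str_list is already a key, so the default is never read.
def max_word_count (str_value : String) : Int :=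
  let str_list := PySem.Str.split₀ str_value
  let str_dict :=
    (PySem.Set.ofList str_list).foldl (fun d i => d.setdefault i 0)
      (PySem.Dict.empty : PySem.Dict String Int)
  let str_dict' := str_list.foldl (fun d j => d.modify j 0 (fun x => x + 1)) str_dict
  let sorted_list := PySem.List.sorted str_dict'.values (fun x => x) true
  if 1 < sorted_list.length then PySem.List.pyGetD sorted_list 1 0
  else PySem.List.pyGetD sorted_list 0 0    -- IndexError on [] is excluded by Pre_

-- ===== PORT B =====
def max_word_count_alt (str_value : String) : Int :=
  let counts := (PySem.Str.split₀ str_value).foldl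
    (fun d w => d.insert w (d.getD w 0 + 1)) (PySem.Dict.empty : PySem.Dict String Int)
  let vals := counts.values
  match PySem.List.max? vals (fun x => x) with
  | none => 0          -- ValueError on empty vals, excluded by Pre_
  | some top =>
    if vals.length = 1 then top
    else
      match PySem.List.max? ((PySem.List.remove? vals top).getD []) (fun x => x) with
      | none => 0      -- unreachable: vals has ≥ 2 elements
      | some m => m

-- ===== PRECONDITION & SPEC =====
-- Pre_ excludes strings with no word (whitespace-only / empty): there A raises IndexError
-- on sorted_list[0] and B raises ValueError on max([]).
def Pre_max_word_count (str_value : String) : Prop := PySem.Str.split₀ str_value ≠ []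
instance (str_value : String) : Decidable (Pre_max_word_count str_value) := by
  unfold Pre_max_word_count; infer_instance

def pvWitness_max_word_count : String := "red blue red green blue red"

def Spec_max_word_count (str_value : String) (out : Int) : Prop := out = max_word_count_alt str_value
instance (str_value : String) (out : Int) : Decidable (Spec_max_word_count str_value out) := by
  unfold Spec_max_word_count; infer_instance

-- ===== CLAIM (what is proved, stated in full; the proofs are below) =====
def Claim_equal_max_word_count : Prop := ∀ (str_value : String), Dom_max_word_count str_value → Pre_max_word_count str_value → Spec_max_word_count str_value (max_word_count str_value)

-- ===== LEMMAS AND PROOFS =====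

-- one setdefault step appends the key iff it is new: exactly PySem.Set.add on the keys
lemma keys_setdefault_add (d : PySem.Dict String Int) (a : String) :
    (d.setdefault a 0).keys = PySem.Set.add d.keys a := by
  rw [PySem.Dict.keys_setdefault]
  by_cases h : d.contains a = true
  · simp [h, PySem.Set.add_of_mem ((PySem.Dict.contains_iff_mem_keys d a).mp h)]
  · have hnm : a ∉ d.keys := fun hm => h ((PySem.Dict.contains_iff_mem_keys d a).mpr hm)
    simp [h, PySem.Set.add_of_not_mem hnm]

-- A's first loop: keys after the setdefault fold
lemma keys_setdefault_fold (l : List String) (d : PySem.Dict String Int) :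
    (l.foldl (fun d i => d.setdefault i 0) d).keys = PySem.Set.update d.keys l := by
  induction l generalizing d with
  | nil => rfl
  | cons a l ih =>
      show (l.foldl (fun d i => d.setdefault i 0) (d.setdefault a 0)).keys
          = PySem.Set.update d.keys (a :: l)
      rw [ih]
      show PySem.Set.update (d.setdefault a 0).keys l
          = l.foldl PySem.Set.add (PySem.Set.add d.keys a)
      rw [keys_setdefault_add]
      rfl

-- A's first loop never changes a lookup with default 0 (it only inserts 0s)
lemma getD_setdefault_fold (l : List String) (d : PySem.Dict String Int) (v : String) :
    (l.foldl (fun d i => d.setdefault i 0) d).getD v 0 = d.getD v 0 := by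
  induction l generalizing d with
  | nil => rfl
  | cons a l ih =>
      show (l.foldl (fun d i => d.setdefault i 0) (d.setdefault a 0)).getD v 0 = d.getD v 0
      rw [ih]
      by_cases h : v = a
      · subst h; exact PySem.Dict.getD_setdefault_self d v 0 0
      · show ((d.setdefault a 0).get? v).getD 0 = (d.get? v).getD 0
        rw [PySem.Dict.get?_setdefault_of_ne d 0 h]

-- folding add over fresh, pairwise-distinct elements appends them
lemma set_foldl_add_fresh (l : List String) : ∀ (s : PySem.Set String),
    (∀ x ∈ l, x ∉ s) → l.Nodup → l.foldl PySem.Set.add s = s ++ l := by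
  induction l with
  | nil => intro s _ _; simp
  | cons a l ih =>
      intro s hfresh hnd
      show l.foldl PySem.Set.add (PySem.Set.add s a) = s ++ a :: l
      rw [PySem.Set.add_of_not_mem (hfresh a List.mem_cons_self),
          ih (s ++ [a])
            (fun x hx hmem => by
              rcases List.mem_append.mp hmem with h | h
              · exact hfresh x (List.mem_cons_of_mem a hx) h
              · exact (List.nodup_cons.mp hnd).1 ((List.mem_singleton.mp h) ▸ hx))
            (List.nodup_cons.mp hnd).2]
      simp

-- a set, re-read as a set, is itself
lemma set_ofList_ofList (ws : List String) :
    PySem.Set.ofList (PySem.Set.ofList ws) = PySem.Set.ofList ws := by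
  have h := set_foldl_add_fresh (PySem.Set.ofList ws) [] (by simp) (PySem.Set.nodup_ofList ws)
  show (PySem.Set.ofList ws).foldl PySem.Set.add [] = PySem.Set.ofList ws
  simpa using h

-- updating a set with elements it already has is the identity
lemma set_update_of_subset (l : List String) (s : PySem.Set String) (h : ∀ x ∈ l, x ∈ s) :
    PySem.Set.update s l = s := by
  induction l generalizing s with
  | nil => rfl
  | cons a l ih =>
      show l.foldl PySem.Set.add (PySem.Set.add s a) = s
      rw [PySem.Set.add_of_mem (h a (List.mem_cons_self))]
      exact ih s (fun x hx => h x (List.mem_cons_of_mem a hx))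

-- A's two loops build exactly Counter(str_list)
lemma dictA_eq_counter (ws : List String) :
    ws.foldl (fun d j => d.modify j 0 (fun x => x + 1))
      ((PySem.Set.ofList ws).foldl (fun d i => d.setdefault i 0)
        (PySem.Dict.empty : PySem.Dict String Int))
    = PySem.Dict.counter ws := by
  set d0 := (PySem.Set.ofList ws).foldl (fun d i => d.setdefault i 0)
      (PySem.Dict.empty : PySem.Dict String Int) with hd0
  have hk0 : d0.keys = PySem.Set.ofList ws := by
    rw [hd0, keys_setdefault_fold]
    have he : (PySem.Dict.empty : PySem.Dict String Int).keys = ([] : List String) := rfl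
    rw [he]
    exact set_ofList_ofList ws
  have hkeys : (ws.foldl (fun d j => d.modify j 0 (fun x => x + 1)) d0).keys
      = PySem.Set.ofList ws := by
    rw [PySem.Dict.keys_foldl_modify ws 0 (fun _ _ v => v + 1) d0, hk0]
    exact set_update_of_subset ws _ (fun x hx => (PySem.Set.mem_ofList ws x).mpr hx)
  have hget : ∀ v, (ws.foldl (fun d j => d.modify j 0 (fun x => x + 1)) d0).getD v 0
      = ((ws.count v : Nat) : Int) := by
    intro v
    rw [PySem.Dict.getD_foldl_modify_add_one ws d0 v, hd0, getD_setdefault_fold]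
    simp [PySem.Dict.getD, PySem.Dict.get?, PySem.Dict.empty]
  apply PySem.Dict.ext
  rw [PySem.Dict.items_eq_map_keys _ (hkeys ▸ PySem.Set.nodup_ofList ws) 0,
      PySem.Dict.items_counter, hkeys]
  exact List.map_congr_left (fun k _ => by rw [hget k])

-- core: A's "second entry of the descending sort (or the only one)" equals
-- B's "max, remove one occurrence, max again (or the only one)"
lemma second_max_eq (vals : List Int) (hne : vals ≠ []) :
    (if 1 < (PySem.List.sorted vals (fun x => x) true).length
      then PySem.List.pyGetD (PySem.List.sorted vals (fun x => x) true) 1 0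
      else PySem.List.pyGetD (PySem.List.sorted vals (fun x => x) true) 0 0)
    =
    (match PySem.List.max? vals (fun x => x) with
    | none => 0
    | some top =>
      if vals.length = 1 then top
      else
        match PySem.List.max? ((PySem.List.remove? vals top).getD []) (fun x => x) with
        | none => 0
        | some m => m) := by
  obtain ⟨m, hm⟩ : ∃ m, PySem.List.max? vals (fun x => x) = some m := by
    cases h : PySem.List.max? vals (fun x => x) with
    | none => exact absurd ((PySem.List.max?_eq_none_iff vals _).mp h) hne
    | some m => exact ⟨m, rfl⟩
  have hmmem : m ∈ vals := PySem.List.max?_mem hm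
  have hmmax : ∀ y ∈ vals, y ≤ m := PySem.List.max?_isMax hm
  have hlen := PySem.List.length_sorted vals (fun x : Int => x) true
  have hperm := PySem.List.sorted_perm vals (fun x : Int => x) true
  cases hs : PySem.List.sorted vals (fun x : Int => x) true with
  | nil => exact absurd ((PySem.List.sorted_eq_nil_iff vals _ true).mp hs) hne
  | cons a t =>
    have hage : ∀ y ∈ vals, y ≤ a := PySem.List.key_head_sorted_rev_ge vals _ hs
    have hamem : a ∈ vals := (hs ▸ hperm).subset List.mem_cons_self
    have ham : a = m := le_antisymm (hmmax a hamem) (hage m hmmem)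
    rw [hm]
    by_cases h1 : vals.length = 1
    · have ht : t = [] := by
        have : (a :: t).length = 1 := by rw [← hs, hlen, h1]
        simpa using this
      subst ht
      simp [h1, PySem.List.pyGetD_zero_cons, ham]
    · have h2 : 2 ≤ vals.length := by
        rcases vals with _ | ⟨x, _ | ⟨y, l⟩⟩ <;> simp_all
      have ht2 : 2 ≤ (a :: t).length := by rw [← hs, hlen]; exact h2
      cases t with
      | nil => simp at ht2
      | cons b t' =>
        have hlt : 1 < (a :: b :: t').length := by simp
        simp only [if_pos hlt, if_neg h1,
            PySem.List.remove?_eq_some_erase vals m hmmem, Option.getD_some]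
        have hpt : (b :: t').Perm (vals.erase m) := by
          subst ham
          have h' : vals.Perm (a :: b :: t') := (hs ▸ hperm).symm
          have h2 := h'.erase a
          rw [List.erase_cons_head] at h2
          exact h2.symm
        have herane : vals.erase m ≠ [] := by
          intro h0
          have := hpt.length_eq
          simp [h0] at this
        obtain ⟨m2, hm2⟩ : ∃ m2, PySem.List.max? (vals.erase m) (fun x => x) = some m2 := by
          cases h : PySem.List.max? (vals.erase m) (fun x => x) with
          | none => exact absurd ((PySem.List.max?_eq_none_iff _ _).mp h) herane
          | some m2 => exact ⟨m2, rfl⟩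
        have hpw := PySem.List.sorted_pairwise_rev vals (fun x : Int => x)
        rw [hs] at hpw
        have hble : ∀ y ∈ b :: t', y ≤ b := by
          intro y hy
          rcases List.mem_cons.mp hy with h | h
          · exact le_of_eq h
          · exact (List.pairwise_cons.mp (List.pairwise_cons.mp hpw).2).1 y h
        have hb1 : b ≤ m2 := PySem.List.max?_isMax hm2 b (hpt.subset List.mem_cons_self)
        have hb2 : m2 ≤ b := hble m2 (hpt.symm.subset (PySem.List.max?_mem hm2))
        have : m2 = b := le_antisymm hb2 hb1
        simp [hm2, this]
        rw [show ((1 : Int) = ((1 : Nat) : Int)) from rfl,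
            PySem.List.pyGetD_ofNat (a :: b :: t') 1 0 (by simp)]
        rfl

-- the counts dict of a nonempty word list has a nonempty values list
lemma counter_values_ne_nil (ws : List String) (h : ws ≠ []) :
    (PySem.Dict.counter ws).values ≠ [] := by
  have hk : (PySem.Dict.counter ws).keys = PySem.Set.ofList ws := PySem.Dict.keys_counter ws
  intro h0
  rcases ws with _ | ⟨w, ws'⟩
  · exact h rfl
  · have hw : w ∈ PySem.Set.ofList (w :: ws') :=
      (PySem.Set.mem_ofList _ w).mpr List.mem_cons_self
    rw [← hk] at hw
    have : (PySem.Dict.counter (w :: ws')).keys = [] := by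
      show (PySem.Dict.counter (w :: ws')).items.map (·.1) = []
      have : (PySem.Dict.counter (w :: ws')).items.map (·.2) = [] := h0
      simp_all
    simp [this] at hw

-- ===== VERDICT (by name: the statement is the Claim_ definition above) =====
theorem max_word_count_spec : Claim_equal_max_word_count := by
  intro s _ hpre
  unfold Spec_max_word_count max_word_count max_word_count_alt
  simp only []
  rw [PySem.Dict.foldl_insert_getD_add_one_eq_counter, dictA_eq_counter]
  exact second_max_eq _ (counter_values_ne_nil _ hpre)
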